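-- pv_equiv track=rewrite | github.com/MugshotDrippedOut/Simon | SWI/3. semester/Kryptologie/RSA/RSA1.py | tNUM4
-- ===== SOURCE A (Python) =====
-- def tNUM4(message):
--     number_every_four = []
--     big_bin = ""
--     for i in message:
--         big_bin += bin(ord(i))[2:].zfill(8)
--     if len(big_bin) % 32 != 0:
--         big_bin += "0" * (32 - (len(big_bin) % 32))
--     for i in range(0, len(big_bin), 32):
--         number_every_four.append(int(big_bin[i:i+32], 2))
--     return number_every_four
-- ===== SOURCE B (Python) =====
-- def tNUM4(message):
--     # Pack the message four 8-bit characters per 32-bit word, zero-padding the last group.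
--     words = []
--     for i in range(0, len(message), 4):
--         group = message[i:i+4]
--         word = 0
--         for c in group:
--             word = (word << 8) + ord(c)
--         words.append(word << (8 * (4 - len(group))))
--     return words
-- ===== Notes on version B (the rewrite author's own statement) =====
-- stated objective: alternative
-- what changed: B packs the message directly, four 8-bit characters per 32-bit word with shifts and adds in one pass over groups, instead of building a binary string with bin/zfill per character, padding it, and re-parsing each 32-character slice with int(s, 2).
import Mathlib
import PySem

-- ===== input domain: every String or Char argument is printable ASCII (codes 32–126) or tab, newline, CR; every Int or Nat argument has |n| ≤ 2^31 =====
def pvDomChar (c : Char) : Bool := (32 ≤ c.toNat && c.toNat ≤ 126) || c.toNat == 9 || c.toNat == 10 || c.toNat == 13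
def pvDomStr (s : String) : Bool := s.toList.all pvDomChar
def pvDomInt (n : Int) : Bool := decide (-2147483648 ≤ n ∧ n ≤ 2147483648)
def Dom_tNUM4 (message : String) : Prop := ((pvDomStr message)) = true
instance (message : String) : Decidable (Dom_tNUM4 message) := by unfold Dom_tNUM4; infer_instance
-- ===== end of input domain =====

-- B packs the message directly, four 8-bit characters per 32-bit word, instead of building
-- a binary string with bin/zfill, padding it, and re-parsing its 32-character slices.

-- ===== PORT A =====
-- bin(ord(i))[2:].zfill(8)
def tNUM4_block (n : Nat) : List Char :=
  PySem.Chars.zfill (PySem.List.slice (PySem.Int.toBinChars0b (n : Int)) (some 2) none) 8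

def pvBinDigit (c : Char) : Nat := if c = '1' then 1 else 0
def pvIsBin (c : Char) : Bool := c = '0' || c = '1'
def pvBinVal (cs : List Char) : Nat := cs.foldl (fun a c => 2 * a + pvBinDigit c) 0

-- hand port of Python's int(s, 2): exact on nonempty '0'/'1' strings, the only strings this
-- program ever passes to it (none = ValueError; PySem's ofCharsBase? additionally accepts
-- whitespace/sign/underscore forms, which cannot occur in big_bin)
def tNUM4_int2? (cs : List Char) : Option Int :=
  if cs ≠ [] ∧ cs.all pvIsBin then some ((pvBinVal cs : Nat) : Int) else none

def tNUM4 (message : String) : List Int :=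
  let bb0 := message.toList.foldl (fun acc c => acc ++ tNUM4_block c.toNat) []
  let bb := if bb0.length % 32 ≠ 0 then bb0 ++ List.replicate (32 - bb0.length % 32) '0' else bb0
  (PySem.List.pyRange 0 (bb.length : Int) 32).foldl
    (fun out i => out ++ [(tNUM4_int2? (PySem.List.slice bb (some i) (some (i + 32)))).getD 0]) []

-- ===== PORT B =====
-- len(group) ≤ 4 always, so the Nat subtraction 4 - group.length is Python's 4 - len(group)
def tNUM4_alt (message : String) : List Int :=
  (PySem.List.pyRange 0 (PySem.Str.len message) 4).foldl
    (fun words i =>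
      let group := PySem.List.slice message.toList (some i) (some (i + 4))
      let word := group.foldl (fun (w : Int) c => (w <<< (8 : Nat)) + (c.toNat : Int)) (0 : Int)
      words ++ [word <<< (8 * (4 - group.length))]) []

-- ===== PRECONDITION & SPEC =====
def Spec_tNUM4 (message : String) (out : List Int) : Prop := out = tNUM4_alt message
instance (message : String) (out : List Int) : Decidable (Spec_tNUM4 message out) := by unfold Spec_tNUM4; infer_instance

-- ===== CLAIM (what is proved, stated in full; the proofs are below) =====
def Claim_equal_tNUM4 : Prop := ∀ (message : String), Dom_tNUM4 message → Spec_tNUM4 message (tNUM4 message)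

-- ===== LEMMAS AND PROOFS =====

-- facts about one 8-bit block, for every ordinal the domain admits
lemma pv_block_facts : ∀ n, n < 127 →
    (tNUM4_block n).length = 8 ∧ (tNUM4_block n).all pvIsBin = true ∧
    pvBinVal (tNUM4_block n) = n := by decide

lemma pv_dom_lt (c : Char) (h : pvDomChar c = true) : c.toNat < 127 := by
  simp [pvDomChar] at h; omega

lemma pv_foldl_binval (ys : List Char) (a : Nat) :
    ys.foldl (fun a c => 2 * a + pvBinDigit c) a = a * 2 ^ ys.length + pvBinVal ys := by
  induction ys generalizing a with
  | nil => simp [pvBinVal]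
  | cons c ys ih =>
    simp only [List.foldl_cons, List.length_cons, pvBinVal]
    rw [ih (2 * a + pvBinDigit c), ih (2 * 0 + pvBinDigit c)]
    ring

lemma pv_binval_append (xs ys : List Char) :
    pvBinVal (xs ++ ys) = pvBinVal xs * 2 ^ ys.length + pvBinVal ys := by
  unfold pvBinVal
  rw [List.foldl_append, pv_foldl_binval]
  rfl

lemma pv_binval_replicate (k : Nat) : pvBinVal (List.replicate k '0') = 0 := by
  induction k with
  | zero => simp [pvBinVal]
  | succ k ih =>
    rw [List.replicate_succ, show ('0' :: List.replicate k '0') = ['0'] ++ List.replicate k '0' from rfl,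
      pv_binval_append, ih]
    simp [pvBinVal, pvBinDigit]

-- the flattened block string of a list of characters
def pvBits (l : List Char) : List Char := l.flatMap (fun c => tNUM4_block c.toNat)

lemma pv_bits_append (x y : List Char) : pvBits (x ++ y) = pvBits x ++ pvBits y := by
  simp [pvBits]

lemma pv_bits_length (l : List Char) (h : ∀ c ∈ l, c.toNat < 127) :
    (pvBits l).length = 8 * l.length := by
  induction l with
  | nil => simp [pvBits]
  | cons c l ih =>
    have hc := (pv_block_facts c.toNat (h c (by simp))).1
    simp only [pvBits, List.flatMap_cons, List.length_append, hc, List.length_cons] at *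
    rw [ih (fun x hx => h x (by simp [hx]))]
    ring

lemma pv_bits_all (l : List Char) (h : ∀ c ∈ l, c.toNat < 127) :
    (pvBits l).all pvIsBin = true := by
  induction l with
  | nil => simp [pvBits]
  | cons c l ih =>
    have hc := (pv_block_facts c.toNat (h c (by simp))).2.1
    simp only [pvBits, List.flatMap_cons, List.all_append, hc, Bool.true_and] at *
    exact ih (fun x hx => h x (by simp [hx]))

-- B's inner loop computes the value of the group's bit string
lemma pv_fold_word (grp : List Char) (h : ∀ c ∈ grp, c.toNat < 127) (a : Int) :
    grp.foldl (fun (w : Int) c => (w <<< (8 : Nat)) + (c.toNat : Int)) a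
      = a * 2 ^ (8 * grp.length) + ((pvBinVal (pvBits grp) : Nat) : Int) := by
  induction grp generalizing a with
  | nil => simp [pvBits, pvBinVal]
  | cons c l ih =>
    have hlt := h c (by simp)
    have hv := (pv_block_facts c.toNat hlt).2.2
    have hlen := pv_bits_length l (fun x hx => h x (by simp [hx]))
    rw [List.foldl_cons, Int.shiftLeft_eq, ih (fun x hx => h x (by simp [hx]))]
    have hval : pvBinVal (pvBits (c :: l)) =
        c.toNat * 2 ^ (8 * l.length) + pvBinVal (pvBits l) := by
      simp only [pvBits, List.flatMap_cons, pv_binval_append]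
      rw [show (l.flatMap fun c => tNUM4_block c.toNat) = pvBits l from rfl, hlen, hv]
    rw [hval]
    simp only [List.length_cons]
    push_cast
    ring

-- a Python range(0, m, s) with a positive step, enumerated
lemma pv_pyRange_step (s m : Nat) (hs : 0 < s) :
    PySem.List.pyRange 0 ((m : Nat) : Int) ((s : Nat) : Int) =
      (List.range ((m + s - 1) / s)).map (fun j => ((s * j : Nat) : Int)) := by
  rw [PySem.List.pyRange_of_pos 0 ((m : Nat) : Int) (by exact_mod_cast hs)]
  rcases Nat.eq_zero_or_pos m with hm | hm
  · subst hm
    rw [if_neg (by norm_num), show (0 + s - 1) / s = 0 from Nat.div_eq_of_lt (by omega)]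
    simp
  · have hcond : (0 : Int) < ((m : Nat) : Int) := by exact_mod_cast hm
    rw [if_pos hcond]
    have hdiv : ((((m : Nat) : Int) - 0 + ((s : Nat) : Int) - 1) / ((s : Nat) : Int)).toNat
        = (m + s - 1) / s := by
      have h1 : (((m : Nat) : Int) - 0 + ((s : Nat) : Int) - 1) = ((m + s - 1 : Nat) : Int) := by
        push_cast [Nat.cast_sub (by omega : 1 ≤ m + s)]
        ring
      rw [h1, show ((m + s - 1 : Nat) : Int) / ((s : Nat) : Int)
          = (((m + s - 1) / s : Nat) : Int) from by push_cast; ring]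
      exact Int.toNat_natCast _
    rw [hdiv]
    refine List.map_congr_left ?_
    intro j _
    push_cast
    ring

-- chunk j of the padded bit string is the bit string of group j, zero-padded to 32 bits
lemma pv_chunk_eq (l : List Char) (h : ∀ c ∈ l, c.toNat < 127) (pad k j : Nat)
    (hpadlt : pad < 32) (hk : 8 * l.length + pad = 32 * k) (hj : j < k) :
    (((pvBits l ++ List.replicate pad '0').drop (32 * j)).take 32)
      = pvBits ((l.drop (4 * j)).take 4)
        ++ List.replicate (32 - 8 * ((l.drop (4 * j)).take 4).length) '0' := by
  have hn : 4 * j < l.length := by omega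
  have hsplit : pvBits l = pvBits (l.take (4 * j)) ++ pvBits (l.drop (4 * j)) := by
    rw [← pv_bits_append, List.take_append_drop]
  have hlen1 : (pvBits (l.take (4 * j))).length = 32 * j := by
    rw [pv_bits_length _ (fun x hx => h x (List.mem_of_mem_take hx)), List.length_take]
    omega
  have hdrop : (pvBits l ++ List.replicate pad '0').drop (32 * j)
      = pvBits (l.drop (4 * j)) ++ List.replicate pad '0' := by
    rw [hsplit, List.append_assoc, ← hlen1, List.drop_left]
  rw [hdrop]
  have hrlen : (l.drop (4 * j)).length = l.length - 4 * j := by simp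
  by_cases hge : 4 ≤ l.length - 4 * j
  · -- a full group of four characters
    have hgrp : ((l.drop (4 * j)).take 4).length = 4 := by
      rw [List.length_take]
      omega
    have hsplit2 : pvBits (l.drop (4 * j))
        = pvBits ((l.drop (4 * j)).take 4) ++ pvBits ((l.drop (4 * j)).drop 4) := by
      rw [← pv_bits_append, List.take_append_drop]
    have hlen2 : (pvBits ((l.drop (4 * j)).take 4)).length = 32 := by
      rw [pv_bits_length _ (fun x hx => h x (List.mem_of_mem_drop (List.mem_of_mem_take hx))), hgrp]
    rw [hsplit2, List.append_assoc, List.take_append_of_le_length (by omega), hgrp]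
    simp [List.take_of_length_le (le_of_eq hlen2)]
  · -- the trailing short group: the whole remainder plus part of the padding
    have hgrp : (l.drop (4 * j)).take 4 = l.drop (4 * j) := by
      rw [List.take_of_length_le (by omega)]
    have hm : ((l.drop (4 * j)).take 4).length = l.length - 4 * j := by
      rw [hgrp, hrlen]
    set m := l.length - 4 * j with hmdef
    have hlen2 : (pvBits (l.drop (4 * j))).length = 8 * m := by
      rw [pv_bits_length _ (fun x hx => h x (List.mem_of_mem_drop hx)), hrlen]
    have hpd : 32 - 8 * m ≤ pad := by omega
    rw [hgrp, List.take_append, hlen2, List.take_replicate, hrlen,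
      List.take_of_length_le (by rw [hlen2]; omega), Nat.min_eq_left hpd]

-- A's final loop, as a map of chunk values
lemma pv_words_A (bb : List Char) (hall : bb.all pvIsBin = true) (k : Nat) (hlen : bb.length = 32 * k) :
    (PySem.List.pyRange 0 ((32 * k : Nat) : Int) 32).foldl
      (fun out i => out ++ [(tNUM4_int2? (PySem.List.slice bb (some i) (some (i + 32)))).getD 0]) []
    = (List.range k).map (fun j => ((pvBinVal ((bb.drop (32 * j)).take 32) : Nat) : Int)) := by
  have hr := pv_pyRange_step 32 (32 * k) (by norm_num)
  rw [show ((32 : Nat) : Int) = (32 : Int) from by norm_num] at hr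
  rw [hr, show (32 * k + 32 - 1) / 32 = k by omega,
    PySem.List.foldl_append_singleton_eq_map, List.nil_append, List.map_map]
  refine List.map_congr_left ?_
  intro j hj
  have hjk : j < k := List.mem_range.mp hj
  simp only [Function.comp_apply]
  have hb : ((32 * j : Nat) : Int) + 32 = ((32 * j + 32 : Nat) : Int) := by push_cast; ring
  rw [hb, PySem.List.slice_natCast, show 32 * j + 32 - 32 * j = 32 by omega]
  set chunk := (bb.drop (32 * j)).take 32 with hchunk
  have hclen : chunk.length = 32 := by
    simp [hchunk, hlen]
    omega
  have hne : chunk ≠ [] := by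
    intro h
    rw [h] at hclen
    simp at hclen
  have hcall : chunk.all pvIsBin = true := by
    rw [List.all_eq_true] at *
    intro x hx
    exact hall x (List.mem_of_mem_drop (List.mem_of_mem_take hx))
  rw [tNUM4_int2?, if_pos ⟨hne, hcall⟩, Option.getD_some]

-- B's loop, as a map of group values
lemma pv_words_B (message : String) (h : ∀ c ∈ message.toList, c.toNat < 127) :
    tNUM4_alt message
      = (List.range ((message.toList.length + 3) / 4)).map (fun j =>
          ((pvBinVal (pvBits ((message.toList.drop (4 * j)).take 4)) : Nat) : Int)
            * 2 ^ (8 * (4 - ((message.toList.drop (4 * j)).take 4).length))) := by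
  unfold tNUM4_alt
  have hr := pv_pyRange_step 4 message.toList.length (by norm_num)
  rw [show ((4 : Nat) : Int) = (4 : Int) from by norm_num] at hr
  rw [show PySem.Str.len message = ((message.toList.length : Nat) : Int) from by
      rw [PySem.Str.len_eq],
    hr, show (message.toList.length + 4 - 1) / 4 = (message.toList.length + 3) / 4 by omega,
    PySem.List.foldl_append_singleton_eq_map, List.nil_append, List.map_map]
  refine List.map_congr_left ?_
  intro j hj
  simp only [Function.comp_apply]
  have hb : ((4 * j : Nat) : Int) + 4 = ((4 * j + 4 : Nat) : Int) := by push_cast; ring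
  rw [hb, PySem.List.slice_natCast, show 4 * j + 4 - 4 * j = 4 by omega]
  set grp := (message.toList.drop (4 * j)).take 4 with hgrp
  have hg : ∀ c ∈ grp, c.toNat < 127 :=
    fun c hc => h c (List.mem_of_mem_drop (List.mem_of_mem_take hc))
  rw [pv_fold_word grp hg 0, Int.shiftLeft_eq]
  ring

-- ===== VERDICT (by name: the statement is the Claim_ definition above) =====
theorem tNUM4_spec : Claim_equal_tNUM4 := by
  intro message hdom
  unfold Spec_tNUM4
  have hlt : ∀ c ∈ message.toList, c.toNat < 127 := by
    intro c hc
    refine pv_dom_lt c ?_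
    unfold Dom_tNUM4 pvDomStr at hdom
    rw [List.all_eq_true] at hdom
    exact hdom c hc
  rw [pv_words_B message hlt]
  simp only [tNUM4]
  have hb : (message.toList.foldl (fun acc c => acc ++ tNUM4_block c.toNat) [])
      = pvBits message.toList := by
    rw [PySem.List.foldl_append_eq_flatMap]
    simp [pvBits]
  rw [hb]
  have hlen0 : (pvBits message.toList).length = 8 * message.toList.length :=
    pv_bits_length message.toList hlt
  have hall0 : (pvBits message.toList).all pvIsBin = true := pv_bits_all message.toList hlt
  set n := message.toList.length with hn
  rw [hlen0]
  -- view both padding branches as one padded string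
  have main : ∀ (pad : Nat), pad < 32 → (8 * n + pad) % 32 = 0 →
      ∀ (bb : List Char), bb = pvBits message.toList ++ List.replicate pad '0' →
      (PySem.List.pyRange 0 (bb.length : Int) 32).foldl
        (fun out i => out ++ [(tNUM4_int2? (PySem.List.slice bb (some i) (some (i + 32)))).getD 0]) []
      = (List.range ((n + 3) / 4)).map (fun j =>
          ((pvBinVal (pvBits ((message.toList.drop (4 * j)).take 4)) : Nat) : Int)
            * 2 ^ (8 * (4 - ((message.toList.drop (4 * j)).take 4).length))) := by
    intro pad hpadlt hmod bb hbb
    set k := (8 * n + pad) / 32 with hkdef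
    have hk : 8 * n + pad = 32 * k := by omega
    have hblen : bb.length = 32 * k := by
      simp [hbb, hlen0]
      omega
    have hball : bb.all pvIsBin = true := by
      rw [hbb, List.all_append, hall0, Bool.true_and, List.all_eq_true]
      intro x hx
      rw [List.eq_of_mem_replicate hx]
      rfl
    rw [hblen, pv_words_A bb hball k hblen, show (n + 3) / 4 = k by omega]
    refine List.map_congr_left ?_
    intro j hj
    have hjk : j < k := List.mem_range.mp hj
    rw [hbb, pv_chunk_eq message.toList hlt pad k j hpadlt hk hjk, pv_binval_append,
      pv_binval_replicate, List.length_replicate, Nat.add_zero]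
    have hgl : ((message.toList.drop (4 * j)).take 4).length ≤ 4 := by
      simp [List.length_take]
    rw [show 32 - 8 * ((message.toList.drop (4 * j)).take 4).length
        = 8 * (4 - ((message.toList.drop (4 * j)).take 4).length) by omega]
    push_cast
    ring
  by_cases hpad : (8 * n) % 32 = 0
  · rw [if_neg (by omega)]
    exact main 0 (by omega) (by omega) _ (by simp)
  · rw [if_pos (by omega)]
    exact main (32 - (8 * n) % 32) (by omega) (by omega) _ rfl
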